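-- pv_equiv track=rewrite | github.com/MrBrantCode/unitest_baseline | mut_generate/mist_train_cf/cf_40329/solution.py | visible_people_count
-- ===== SOURCE A (Python) =====
-- from typing import List
--
-- def visible_people_count(h: List[int]) -> int:
--     visible_count = 0
--     max_height = 0
--
--     for height in h:
--         if height > max_height:
--             visible_count += 1
--             max_height = height
--
--     return visible_count
-- ===== SOURCE B (Python) =====
-- from typing import List
--
-- def visible_people_count(h: List[int]) -> int:
--     # Two-pass: build a prefix-maximum table (entry i = max of all elements
--     # before index i, 0-initialized), then count elements strictly above it.
--     prefix = [0]
--     for x in h: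
--         prefix.append(max(prefix[-1], x))
--     return sum(1 for x, m in zip(h, prefix) if x > m)
-- ===== Notes on version B (the rewrite author's own statement) =====
-- stated objective: alternative
-- what changed: Replaces A's fused single loop carrying (count, running max) by two separate passes: first build an explicit 0-initialized prefix-maximum table, then count elements strictly greater than the table entry at their position.
import Mathlib
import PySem

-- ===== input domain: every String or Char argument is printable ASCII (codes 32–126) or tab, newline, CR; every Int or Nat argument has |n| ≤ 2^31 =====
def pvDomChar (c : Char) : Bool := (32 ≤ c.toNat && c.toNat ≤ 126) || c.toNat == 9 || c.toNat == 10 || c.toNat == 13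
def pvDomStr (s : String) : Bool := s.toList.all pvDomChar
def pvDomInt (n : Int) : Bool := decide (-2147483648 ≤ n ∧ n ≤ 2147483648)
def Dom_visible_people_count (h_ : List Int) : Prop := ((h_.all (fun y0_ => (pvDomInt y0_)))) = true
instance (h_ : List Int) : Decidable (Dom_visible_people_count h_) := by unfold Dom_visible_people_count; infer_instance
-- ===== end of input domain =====

-- B replaces A's fused single loop by two passes: an explicit 0-initialized
-- pfx-maximum table, then a counting pass over zip(h, pfx) (objective: alternative).

-- ===== PORT A =====
-- one loop carrying (visible_count, max_height)
def visible_people_count (h_ : List Int) : Int :=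
  (h_.foldl (fun (s : Int × Int) height =>
      if height > s.2 then (s.1 + 1, height) else s) (0, 0)).1

-- ===== PORT B =====
-- pass 1: pfx = [0]; for x in h: pfx.append(max(pfx[-1], x))
-- pass 2: sum(1 for x, m in zip(h, pfx) if x > m)
def visible_people_count_alt (h_ : List Int) : Int :=
  let pfx := h_.foldl (fun p x => p ++ [max p.getLast! x]) [0]
  (((h_.zip pfx).filter (fun xm => xm.1 > xm.2)).length : Int)

-- ===== PRECONDITION & SPEC =====
def Spec_visible_people_count (h_ : List Int) (out : Int) : Prop := out = visible_people_count_alt h_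
instance (h_ : List Int) (out : Int) : Decidable (Spec_visible_people_count h_ out) := by unfold Spec_visible_people_count; infer_instance

-- ===== CLAIM (what is proved, stated in full; the proofs are below) =====
def Claim_equal_visible_people_count : Prop := ∀ (h_ : List Int), Dom_visible_people_count h_ → Spec_visible_people_count h_ (visible_people_count h_)

-- ===== LEMMAS AND PROOFS =====

-- reference count: number of strict new maxima of l given current running max m
def pvCnt (m : Int) : List Int → Nat
  | [] => 0
  | x :: t => (if x > m then 1 else 0) + pvCnt (max m x) t

-- the scan of running maxima (tail of B's pfx table)
def pvScan (m : Int) : List Int → List Int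
  | [] => []
  | x :: t => max m x :: pvScan (max m x) t

theorem pvA_foldl (l : List Int) : ∀ (c m : Int),
    (l.foldl (fun (s : Int × Int) height =>
      if height > s.2 then (s.1 + 1, height) else s) (c, m)).1 = c + pvCnt m l := by
  induction l with
  | nil => intro c m; simp [pvCnt]
  | cons x t ih =>
    intro c m
    by_cases hx : x > m
    · simp [List.foldl, hx, pvCnt, ih, max_eq_right (le_of_lt hx)]
      ring
    · simp [List.foldl, hx, pvCnt, ih, max_eq_left (le_of_not_gt hx)]

theorem pvB_foldl (l : List Int) : ∀ (p : List Int) (m : Int), p ≠ [] → p.getLast! = m →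
    l.foldl (fun p x => p ++ [max p.getLast! x]) p = p ++ pvScan m l := by
  induction l with
  | nil => intro p m _ _; simp [pvScan]
  | cons x t ih =>
    intro p m hp hlast
    have hlast' : p.getLast?.getD 0 = m := by simpa using hlast
    have hlast2 : (p ++ [max p.getLast! x]).getLast! = max m x := by
      simp [hlast']
    simp only [List.foldl_cons]
    rw [ih (p ++ [max p.getLast! x]) (max m x) (by simp) hlast2, hlast, pvScan]
    simp

theorem pvB_count (l : List Int) : ∀ (m : Int),
    ((l.zip (m :: pvScan m l)).filter (fun xm => xm.1 > xm.2)).length = pvCnt m l := by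
  induction l with
  | nil => intro m; simp [pvCnt]
  | cons x t ih =>
    intro m
    simp only [pvScan, List.zip_cons_cons, List.filter, pvCnt]
    by_cases hx : x > m
    · simp [hx, ih]; omega
    · simp [hx, ih]

-- ===== VERDICT (by name: the statement is the Claim_ definition above) =====
theorem visible_people_count_spec : Claim_equal_visible_people_count := by
  intro h_ _
  unfold Spec_visible_people_count visible_people_count visible_people_count_alt
  rw [pvA_foldl h_ 0 0, pvB_foldl h_ [0] 0 (by simp) (by simp)]
  simp only [List.singleton_append]
  rw [pvB_count h_ 0]
  omega
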